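-- pv_equiv track=rewrite | github.com/N0urDEV/Password-Strength-Evaluator | password score calculator.py | LongMin
-- ===== SOURCE A (Python) =====
-- def LongMin(password):
--     max_length = 0
--     current_length = 0
--
--     for char in password:
--         if char.islower():
--             current_length += 1
--             max_length = max(max_length, current_length)
--         else:
--             current_length = 0
--
--     return max_length
-- ===== SOURCE B (Python) =====
-- def LongMin(password):
--     # Build the list of maximal lowercase-run lengths, then reduce with max.
--     runs = []
--     i = 0
--     n = len(password)
--     while i < n:
--         if password[i].islower():
--             j = i
--             while j < n and password[j].islower():
--                 j += 1
--             runs.append(j - i)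
--             i = j
--         else:
--             i += 1
--     return max(runs, default=0)
-- ===== Notes on version B (the rewrite author's own statement) =====
-- stated objective: alternative
-- what changed: Replaces the running-counter single pass (current/max updated per character) with a build-runs-then-reduce decomposition: scan out each maximal lowercase run, collect the run lengths, and return their maximum (default 0).
import Mathlib
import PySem

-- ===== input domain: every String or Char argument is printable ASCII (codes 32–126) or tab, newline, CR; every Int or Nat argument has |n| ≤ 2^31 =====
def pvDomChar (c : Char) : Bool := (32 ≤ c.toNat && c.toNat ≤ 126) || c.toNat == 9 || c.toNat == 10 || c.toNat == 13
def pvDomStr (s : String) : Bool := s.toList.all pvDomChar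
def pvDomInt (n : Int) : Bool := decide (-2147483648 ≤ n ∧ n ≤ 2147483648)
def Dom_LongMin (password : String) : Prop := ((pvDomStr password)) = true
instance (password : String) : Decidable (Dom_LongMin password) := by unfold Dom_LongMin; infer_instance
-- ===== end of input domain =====

-- B replaces A's running-counter single pass with a build-lowercase-runs-then-reduce-with-max decomposition (same O(n) cost).


-- ===== PORT A =====
-- per-character step of A's loop: state = (max_length, current_length)
def lmStep (st : Int × Int) (c : Char) : Int × Int :=
  if PySem.Chars.islower c then (max st.1 (st.2 + 1), st.2 + 1) else (st.1, 0)

def LongMin (password : String) : Int :=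
  (password.toList.foldl lmStep ((0 : Int), (0 : Int))).1

-- ===== PORT B =====
-- the list of lengths of the maximal lowercase runs of l (B's inner while loop = takeWhile/dropWhile)
def lmRuns : List Char → List Int
  | [] => []
  | x :: xs =>
      if PySem.Chars.islower x then
        ((1 : Int) + (xs.takeWhile PySem.Chars.islower).length) :: lmRuns (xs.dropWhile PySem.Chars.islower)
      else lmRuns xs
termination_by l => l.length
decreasing_by
  · simpa using Nat.lt_succ_of_le (List.length_dropWhile_le _ _)
  · simp

def LongMin_alt (password : String) : Int :=
  (lmRuns password.toList).foldl max 0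

-- ===== PRECONDITION & SPEC =====
def Spec_LongMin (password : String) (out : Int) : Prop := out = LongMin_alt password
instance (password : String) (out : Int) : Decidable (Spec_LongMin password out) := by unfold Spec_LongMin; infer_instance

-- ===== CLAIM (what is proved, stated in full; the proofs are below) =====
def Claim_equal_LongMin : Prop := ∀ (password : String), Dom_LongMin password → Spec_LongMin password (LongMin password)

-- ===== LEMMAS AND PROOFS =====

theorem lm_foldl_max_max (rs : List Int) : ∀ a b : Int, rs.foldl max (max a b) = max a (rs.foldl max b) := by
  induction rs with
  | nil => intro a b; simp [List.foldl]
  | cons r rs ih =>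
      intro a b
      simp only [List.foldl, max_assoc]
      exact ih a (max b r)

theorem lm_le_foldl_max (rs : List Int) : ∀ b : Int, b ≤ rs.foldl max b := by
  induction rs with
  | nil => intro b; simp [List.foldl]
  | cons r rs ih => intro b; exact le_trans (le_max_left b r) (ih _)

theorem lm_dropWhile_head_false (p : Char → Bool) :
    ∀ (xs : List Char) (y : Char) (ys : List Char), xs.dropWhile p = y :: ys → p y = false := by
  intro xs
  induction xs with
  | nil => intro y ys h; simp [List.dropWhile] at h
  | cons x xs ih =>
      intro y ys h
      by_cases hp : p x = true
      · exact ih y ys (by simpa [List.dropWhile, hp] using h)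
      · simp only [List.dropWhile, hp] at h
        rw [List.cons.injEq] at h
        rcases h with ⟨h1, _⟩
        subst h1
        simpa using hp

-- A's loop over an all-lowercase block t starting at state (m, c) with c ≤ m
theorem lm_runFold : ∀ (t : List Char) (m c : Int),
    (∀ y ∈ t, PySem.Chars.islower y = true) → c ≤ m →
    t.foldl lmStep (m, c) = (max m (c + t.length), c + t.length) := by
  intro t
  induction t with
  | nil => intro m c _ hcm; simp [max_eq_left hcm]
  | cons y ys ih =>
      intro m c hall hcm
      have hy : PySem.Chars.islower y = true := hall y (by simp)
      have h1 : c + 1 ≤ max m (c + 1) := le_max_right _ _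
      have hrec := ih (max m (c + 1)) (c + 1) (fun z hz => hall z (by simp [hz])) h1
      simp only [List.foldl, lmStep, hy, if_pos]
      rw [hrec]
      have h2 : max (c + 1) (c + 1 + (ys.length : Int)) = c + 1 + ys.length :=
        max_eq_right (by omega)
      rw [max_assoc, h2]
      have h3 : c + ((y :: ys).length : Int) = c + 1 + ys.length := by
        push_cast [List.length_cons]; ring
      rw [h3]

-- main invariant: A's fold from (m, 0) computes max of m and B's run maximum
theorem lm_main (l : List Char) (m : Int) (hm : 0 ≤ m) :
    (l.foldl lmStep (m, 0)).1 = max m ((lmRuns l).foldl max 0) := by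
  match hl : l with
  | [] => simp [lmRuns, max_eq_left hm]
  | x :: xs =>
      by_cases hx : PySem.Chars.islower x = true
      · have hsplit : xs.takeWhile PySem.Chars.islower ++ xs.dropWhile PySem.Chars.islower = xs :=
          List.takeWhile_append_dropWhile
        set t := xs.takeWhile PySem.Chars.islower with ht
        set r := xs.dropWhile PySem.Chars.islower with hr
        have hall : ∀ y ∈ t, PySem.Chars.islower y = true := fun y hy =>
          List.mem_takeWhile_imp hy
        have hfold1 : (x :: xs).foldl lmStep (m, 0) = r.foldl lmStep (max m (1 + t.length), 1 + t.length) := by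
          conv_lhs => rw [← hsplit]
          simp only [List.foldl_cons, List.foldl_append, lmStep, hx, if_pos]
          rw [show ((0 : Int) + 1) = 1 by ring]
          rw [lm_runFold t (max m 1) 1 hall (le_max_right _ _)]
          rw [max_assoc, max_eq_right (by omega : (1:Int) ≤ 1 + t.length)]
        have hruns : lmRuns (x :: xs) = ((1 : Int) + t.length) :: lmRuns r := by
          rw [lmRuns]; simp [hx, ht, hr]
        match hrr : r with
        | [] =>
            rw [hfold1, hruns]
            simp only [List.foldl_nil, List.foldl_cons, lmRuns]
            rw [max_eq_right (by omega : (0 : Int) ≤ 1 + (t.length : Int))]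
        | y :: ys =>
            have hy : PySem.Chars.islower y = false :=
              lm_dropWhile_head_false _ xs y ys hr.symm
            have hlen : ys.length < (x :: xs).length := by
              have := congrArg List.length hsplit
              simp at this
              simp; omega
            rw [hfold1, hruns]
            simp only [List.foldl_cons, lmStep, hy, Bool.false_eq_true, if_neg, not_false_iff]
            have hruns2 : lmRuns (y :: ys) = lmRuns ys := by rw [lmRuns]; simp [hy]
            rw [lm_main ys (max m (1 + t.length)) (le_trans hm (le_max_left _ _))]
            rw [hruns2, max_comm (0 : Int) ((1 : Int) + t.length), lm_foldl_max_max, max_assoc]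
      · have hx' : PySem.Chars.islower x = false := by simpa using hx
        have hruns : lmRuns (x :: xs) = lmRuns xs := by rw [lmRuns]; simp [hx']
        have hlen : xs.length < (x :: xs).length := by simp
        simp only [List.foldl_cons, lmStep, hx', Bool.false_eq_true, if_neg, not_false_iff]
        rw [lm_main xs m hm, hruns]
termination_by l.length
decreasing_by
  · have := congrArg List.length hsplit
    simp at this
    simp
    omega
  · simp

-- ===== VERDICT (by name: the statement is the Claim_ definition above) =====
theorem LongMin_spec : Claim_equal_LongMin := by
  intro password _
  unfold Spec_LongMin LongMin LongMin_alt
  rw [lm_main password.toList 0 le_rfl]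
  exact max_eq_right (lm_le_foldl_max _ _)
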